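-- pv_equiv track=rewrite | github.com/yunn3/recursion-problems | intermediate/246-rotateByTimes/main.py | rotateByTimes
-- ===== SOURCE A (Python) =====
-- def rotateByTimes(ids: list[int], n: int) -> list[int]:
--     new_rooms = []
--     list_length = len(ids)
--
--     for current_index in range(list_length):
--         new_rooms.append(
--             ids[(list_length - n % list_length + current_index) % list_length],
--         )
--     return new_rooms
-- ===== SOURCE B (Python) =====
-- def rotateByTimes(ids: list[int], n: int) -> list[int]:
--     if not ids:
--         return []
--     k = n % len(ids)
--     return ids[-k:] + ids[:-k]
-- ===== Notes on version B (the rewrite author's own statement) =====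
-- stated objective: simpler
-- what changed: Replaces A's per-element indexed append loop with two bulk slices (ids[-k:] + ids[:-k]) after reducing n modulo the length, with an explicit empty-list guard.
import Mathlib
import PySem

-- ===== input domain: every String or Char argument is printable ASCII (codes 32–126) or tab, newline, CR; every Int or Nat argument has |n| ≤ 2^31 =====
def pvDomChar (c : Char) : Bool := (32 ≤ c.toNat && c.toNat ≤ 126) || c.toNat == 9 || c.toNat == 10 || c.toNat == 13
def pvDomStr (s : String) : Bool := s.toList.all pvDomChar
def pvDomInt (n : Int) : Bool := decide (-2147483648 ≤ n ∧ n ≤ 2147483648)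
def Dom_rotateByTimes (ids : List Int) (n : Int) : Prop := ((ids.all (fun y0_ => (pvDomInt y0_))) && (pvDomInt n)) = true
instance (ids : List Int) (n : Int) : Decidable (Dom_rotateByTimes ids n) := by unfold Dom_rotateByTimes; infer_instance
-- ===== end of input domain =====

-- B rotates by two bulk slices after reducing n modulo the length (simpler than A's per-element indexed append loop); return values agree on all inputs.

-- ===== PORT A =====
def rotateByTimes (ids : List Int) (n : Int) : List Int :=
  let list_length : Int := ids.length
  (PySem.List.pyRange 0 list_length 1).foldl
    (fun new_rooms current_index =>
      new_rooms ++
        [PySem.List.pyGetD ids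
          (PySem.Int.mod (list_length - PySem.Int.mod n list_length + current_index) list_length) 0])
    []

-- ===== PORT B =====
def rotateByTimes_alt (ids : List Int) (n : Int) : List Int :=
  if ids = [] then []
  else
    let k := PySem.Int.mod n (ids.length : Int)
    PySem.List.slice ids (some (-k)) none ++ PySem.List.slice ids none (some (-k))

-- ===== PRECONDITION & SPEC =====
def Spec_rotateByTimes (ids : List Int) (n : Int) (out : List Int) : Prop := out = rotateByTimes_alt ids n
instance (ids : List Int) (n : Int) (out : List Int) : Decidable (Spec_rotateByTimes ids n out) := by unfold Spec_rotateByTimes; infer_instance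

-- ===== CLAIM (what is proved, stated in full; the proofs are below) =====
def Claim_equal_rotateByTimes : Prop := ∀ (ids : List Int) (n : Int), Dom_rotateByTimes ids n → Spec_rotateByTimes ids n (rotateByTimes ids n)

-- ===== LEMMAS AND PROOFS =====

-- Core combinatorial fact: the index-computed rotation equals drop-then-take concatenation.
lemma rot_key (ids : List Int) (kn : Nat) (h : kn < ids.length) :
    (List.range ids.length).map (fun j => ids.getD ((ids.length - kn + j) % ids.length) 0)
      = ids.drop (ids.length - kn) ++ ids.take (ids.length - kn) := by
  apply List.ext_getElem
  · simp
  · intro m hm hm'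
    have hL : 0 < ids.length := by omega
    simp only [List.getElem_map, List.getElem_range]
    have hmlen : m < ids.length := by simpa using hm
    by_cases hmk : m < kn
    · have hidx : (ids.length - kn + m) % ids.length = ids.length - kn + m :=
        Nat.mod_eq_of_lt (by omega)
      rw [hidx, List.getD_eq_getElem _ _ (by omega),
        List.getElem_append_left (by simp; omega), List.getElem_drop]
    · have hidx : (ids.length - kn + m) % ids.length = m - kn := by
        rw [Nat.mod_eq_sub_mod (by omega), Nat.mod_eq_of_lt (by omega)]
        omega
      rw [hidx, List.getD_eq_getElem _ _ (by omega),
        List.getElem_append_right (by simp; omega)]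
      simp only [List.getElem_take]
      congr 1
      simp only [List.length_drop]
      omega

-- ===== VERDICT (by name: the statement is the Claim_ definition above) =====
theorem rotateByTimes_spec : Claim_equal_rotateByTimes := by
  intro ids n _
  unfold Spec_rotateByTimes rotateByTimes rotateByTimes_alt
  by_cases hnil : ids = []
  · subst hnil; simp
  · simp only [if_neg hnil]
    have hL : 0 < ids.length := List.length_pos_of_ne_nil hnil
    set L : Int := (ids.length : Int) with hLdef
    have hLpos : (0 : Int) < L := by simp [hLdef]; omega
    set k : Int := PySem.Int.mod n L with hk
    have hk0 : 0 ≤ k := by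
      rw [hk, PySem.Int.mod_eq_emod_of_pos hLpos]; exact Int.emod_nonneg n (by omega)
    have hkL : k < L := by
      rw [hk, PySem.Int.mod_eq_emod_of_pos hLpos]; exact Int.emod_lt_of_pos n hLpos
    set kn : Nat := k.toNat with hkn
    have hkcast : (kn : Int) = k := Int.toNat_of_nonneg hk0
    have hknlt : kn < ids.length := by omega
    -- A side: fold becomes a map over range
    rw [PySem.List.foldl_append_singleton_eq_map, PySem.List.pyRange_one]
    simp only [List.nil_append]
    have hsub : ((L : Int) - 0).toNat = ids.length := by simp [hLdef]
    rw [hsub]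
    -- B side: slices become drop/take
    have hBs : PySem.List.slice ids (some (-k)) none ++ PySem.List.slice ids none (some (-k))
        = ids.drop (ids.length - kn) ++ ids.take (ids.length - kn) := by
      by_cases hk0' : k = 0
      · rw [hk0']
        have hkn0 : kn = 0 := by omega
        rw [hkn0]
        simp [PySem.List.slice_some_none, PySem.List.slice_to (xs := ids) (b := (0:Int)) (by omega),
          PySem.List.clampIdx]
      · have hknpos : 0 < kn := by omega
        rw [← hkcast]
        rw [PySem.List.slice_from_neg_natCast _ _ hknpos,
          PySem.List.slice_to_neg_natCast _ _ hknpos]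
    rw [hBs, ← rot_key ids kn hknlt]
    simp only [List.map_map]
    apply List.map_congr_left
    intro j hj
    have hjlt : j < ids.length := List.mem_range.mp hj
    simp only [Function.comp_apply]
    have hcast : L - PySem.Int.mod n L + ((0 : Int) + (j : Int)) = ((ids.length - kn + j : Nat) : Int) := by
      push_cast [← hk]
      omega
    rw [hcast, PySem.Int.mod_natCast, PySem.List.pyGetD_natCast]
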